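-- pv_equiv track=rewrite | github.com/ClarinCodes/fcc-daily-coding-challenges | Python/#235 | Capitalized Fibonacci.py | capitalize_fibonacci
-- ===== SOURCE A (Python) =====
-- def capitalize_fibonacci(s):
--     if not isinstance(s, str):
--         raise TypeError("Input must be a string")
--
--     fib = set()
--     first, second = 0, 1
--
--     while first < len(s):
--         fib.add(first)
--         first, second = second, first + second
--
--     output = []
--
--     for i, char in enumerate(s):
--         if i in fib:
--             if char.isalpha():
--                 output.append(char.upper())
--             else:
--                 output.append(char)
--         else:
--             output.append(char.lower())
--
--     return ''.join(output)
-- ===== SOURCE B (Python) =====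
-- def capitalize_fibonacci(s):
--     if not isinstance(s, str):
--         raise TypeError("Input must be a string")
--
--     def segment(a, b):
--         # emit the chunk [a, b): uppercase its head (a Fibonacci index), bulk-lowercase the rest
--         if a >= len(s):
--             return ''
--         if b == a:  # the duplicated Fibonacci value 1: advance without emitting twice
--             return segment(b, a + b)
--         c = s[a]
--         head = c.upper() if c.isalpha() else c
--         return head + s[a + 1:b].lower() + segment(b, a + b)
--
--     return segment(0, 1)
-- ===== Notes on version B (the rewrite author's own statement) =====
-- stated objective: faster
-- what changed: B replaces A's precompute-a-Fibonacci-index-set-then-test-every-position scan with a recursive decomposition of the string into Fibonacci segments [fib_k, fib_{k+1}): each of the O(log n) recursive calls emits the uppercased segment head plus the bulk-lowercased slice up to the next Fibonacci index, so no index set, no per-character membership test and no per-character Python loop exist.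
import Mathlib
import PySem

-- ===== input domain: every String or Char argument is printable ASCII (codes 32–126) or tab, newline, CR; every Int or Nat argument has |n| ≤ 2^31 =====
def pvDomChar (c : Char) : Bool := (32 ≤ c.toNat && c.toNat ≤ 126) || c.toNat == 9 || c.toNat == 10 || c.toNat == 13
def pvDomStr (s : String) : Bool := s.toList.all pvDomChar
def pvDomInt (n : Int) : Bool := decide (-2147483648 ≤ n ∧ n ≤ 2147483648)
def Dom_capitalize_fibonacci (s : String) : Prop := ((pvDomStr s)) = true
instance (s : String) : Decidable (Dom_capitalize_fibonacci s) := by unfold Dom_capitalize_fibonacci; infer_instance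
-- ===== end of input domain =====

-- B replaces A's precomputed Fibonacci-index set and per-character membership test with a
-- recursion over Fibonacci segments that emits one uppercased head plus a bulk-lowercased
-- slice per call (objective: faster by constant factor, measured).

-- ===== PORT A =====
-- the 'while first < len(s): fib.add(first); first, second = second, first + second' loop;
-- the hypothesis 0 < second (invariant of the Python loop, initially second = 1) makes it terminate
def fibSetA (n : Nat) (first second : Nat) (h : 0 < second) (acc : PySem.Set Int) : PySem.Set Int :=
  if first < n then
    fibSetA n second (first + second) (Nat.lt_of_lt_of_le h (Nat.le_add_left _ _))
      (PySem.Set.add acc (first : Int))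
  else acc
termination_by (n - first) + (n - second)
decreasing_by omega

def capitalize_fibonacci (s : String) : String :=
  let cs := s.toList
  let fib := fibSetA cs.length 0 1 Nat.one_pos PySem.Set.empty
  let output := (PySem.List.enumerate cs).foldl
    (fun acc ic =>
      if PySem.Set.contains fib ic.1 then
        if PySem.Chars.isalpha ic.2 then acc ++ [PySem.Chars.upperChar ic.2]
        else acc ++ [ic.2]
      else acc ++ [PySem.Chars.lowerChar ic.2]) []
  String.ofList output

-- ===== PORT B =====
-- Source B's 'segment(a, b)' recursion, transcribed with a fuel bound on the recursion depth
-- (the measure (len - a) + (len - b) shrinks every call, so fuel 2*len + 1 is never exhausted).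
-- s[a] with 0 ≤ a < len(s) is exact as getD; s[a+1:b].lower() is exact as the slice
-- mapped through lowerChar (PySem.Str.toList_lower).
def segB (cs : List Char) (fuel : Nat) (a b : Nat) : List Char :=
  match fuel with
  | 0 => []
  | fuel + 1 =>
    if a < cs.length then
      if b = a then segB cs fuel b (a + b)
      else
        let c := cs.getD a ' '
        (if PySem.Chars.isalpha c then PySem.Chars.upperChar c else c) ::
          ((PySem.List.slice cs (some ((a : Int) + 1)) (some (b : Int))).map PySem.Chars.lowerChar
            ++ segB cs fuel b (a + b))
    else []

def capitalize_fibonacci_alt (s : String) : String :=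
  String.ofList (segB s.toList (2 * s.toList.length + 1) 0 1)

-- ===== PRECONDITION & SPEC =====
def Spec_capitalize_fibonacci (s : String) (out : String) : Prop := out = capitalize_fibonacci_alt s
instance (s : String) (out : String) : Decidable (Spec_capitalize_fibonacci s out) := by unfold Spec_capitalize_fibonacci; infer_instance

-- ===== CLAIM (what is proved, stated in full; the proofs are below) =====
def Claim_equal_capitalize_fibonacci : Prop := ∀ (s : String), Dom_capitalize_fibonacci s → Spec_capitalize_fibonacci s (capitalize_fibonacci s)

-- ===== LEMMAS AND PROOFS =====

-- reference list of the Fibonacci values below n produced by the common (a, b) trajectory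
def fibTraj (n a b : Nat) (h : 0 < b) : List Nat :=
  if a < n then a :: fibTraj n b (a + b) (Nat.lt_of_lt_of_le h (Nat.le_add_left _ _)) else []
termination_by (n - a) + (n - b)
decreasing_by omega

-- the per-index output character both programs agree on
def outChar (cs : List Char) (n a b : Nat) (hb : 0 < b) (i : Nat) : Char :=
  if i ∈ fibTraj n a b hb then
    (if PySem.Chars.isalpha (cs.getD i ' ') then PySem.Chars.upperChar (cs.getD i ' ')
     else cs.getD i ' ')
  else PySem.Chars.lowerChar (cs.getD i ' ')

theorem mem_fibSetA {n : Nat} (a b : Nat) (h : 0 < b) (acc : PySem.Set Int) (i : Int) :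
    (i ∈ fibSetA n a b h acc) ↔ i ∈ acc ∨ ∃ k ∈ fibTraj n a b h, (k : Int) = i := by
  fun_induction fibSetA n a b h acc with
  | case1 a b hb acc hlt ih =>
    rw [fibTraj, if_pos hlt, ih]
    simp only [PySem.Set.mem_add, List.mem_cons]
    constructor
    · rintro (⟨hacc | rfl⟩ | ⟨k, hk, rfl⟩)
      · exact Or.inl hacc
      · exact Or.inr ⟨a, Or.inl rfl, rfl⟩
      · exact Or.inr ⟨k, Or.inr hk, rfl⟩
    · rintro (hacc | ⟨k, (rfl | hk), rfl⟩)
      · exact Or.inl (Or.inl hacc)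
      · exact Or.inl (Or.inr rfl)
      · exact Or.inr ⟨k, hk, rfl⟩
  | case2 a b hb acc hlt =>
    rw [fibTraj, if_neg hlt]
    simp

-- A's membership test 'i in fib' answers exactly 'i lies on the trajectory'
theorem contains_fibSetA (n i : Nat) :
    PySem.Set.contains (fibSetA n 0 1 Nat.one_pos PySem.Set.empty) (i : Int)
      = decide (i ∈ fibTraj n 0 1 Nat.one_pos) := by
  rw [Bool.eq_iff_iff, PySem.Set.contains, List.contains_iff_mem, decide_eq_true_iff,
    mem_fibSetA 0 1 Nat.one_pos PySem.Set.empty (i : Int)]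
  simp only [PySem.Set.empty, List.not_mem_nil, false_or]
  constructor
  · rintro ⟨k, hk, hki⟩
    have hk2 : k = i := by exact_mod_cast hki
    exact hk2 ▸ hk
  · intro hmem; exact ⟨i, hmem, rfl⟩

-- every value on the trajectory from (a, b) with a ≤ b is at least a
theorem fibTraj_mem_ge (n a b : Nat) (h : 0 < b) (hab : a ≤ b) (x : Nat)
    (hx : x ∈ fibTraj n a b h) : a ≤ x := by
  fun_induction fibTraj n a b h with
  | case1 a b hb hlt ih =>
    rcases List.mem_cons.1 hx with rfl | hx'
    · exact le_refl _
    · exact le_trans hab (ih (Nat.le_add_left _ _) hx')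
  | case2 a b hb hlt => simp at hx

theorem foldl_append_ite (l : List (Int × Char)) (P : Int → Bool) (Q : Char → Bool)
    (u v : Char → Char) (acc : List Char) :
    l.foldl (fun a ic => if P ic.1 then (if Q ic.2 then a ++ [u ic.2] else a ++ [ic.2])
                         else a ++ [v ic.2]) acc =
      acc ++ l.map (fun ic => if P ic.1 then (if Q ic.2 then u ic.2 else ic.2) else v ic.2) := by
  induction l generalizing acc with
  | nil => simp
  | cons x l ih => rw [List.foldl_cons, List.map_cons]; split_ifs <;> simp [ih]

-- a take-of-drop slice, mapped, as a map over the index range it covers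
theorem drop_take_map (cs : List Char) (s k : Nat) (f : Char → Char) :
    ((cs.drop s).take k).map f
      = (List.range' s (min k (cs.length - s))).map (fun i => f (cs.getD i ' ')) := by
  apply List.ext_getElem?
  intro j
  rw [List.getElem?_map, List.getElem?_take, List.getElem?_drop, List.getElem?_map]
  by_cases hj : j < min k (cs.length - s)
  · rw [List.getElem?_range' hj, if_pos (by omega),
      List.getElem?_eq_getElem (show s + j < cs.length by omega)]
    simp only [Option.map_some, Option.some.injEq, Nat.one_mul]
    simp [List.getD, List.getElem?_eq_getElem (show s + j < cs.length by omega)]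
  · have hn : (List.range' s (min k (cs.length - s)))[j]? = none :=
      List.getElem?_eq_none (by simp [List.length_range']; omega)
    rw [hn]
    split_ifs with hjk
    · rw [List.getElem?_eq_none (by omega)]; rfl
    · rfl

-- B's recursion computes exactly the per-index rule over the remaining index range
-- (induction on the explicit measure of segB's recursion)
theorem segB_eq_aux (m : Nat) : ∀ (cs : List Char) (a b : Nat) (hab : a ≤ b) (hb : 0 < b),
    (cs.length - a) + (cs.length - b) < m →
    segB cs m a b = (List.range' a (cs.length - a)).map (outChar cs cs.length a b hb) := by
  induction m with
  | zero =>
    intro cs a b hab hb hm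
    omega
  | succ m ih =>
    intro cs a b hab hb hm
    by_cases hlt : a < cs.length
    · by_cases heq : b = a
      · -- duplicated Fibonacci value (b = a): skip without emitting; same membership set
        subst heq
        rw [segB, if_pos hlt, if_pos rfl,
          ih cs b (b + b) (by omega) (by omega) (by omega)]
        have hTT : fibTraj cs.length b b hb
            = b :: fibTraj cs.length b (b + b) (by omega) := by
          rw [fibTraj, if_pos hlt]
        apply List.map_congr_left
        intro i _
        have hhead : b ∈ fibTraj cs.length b (b + b) (by omega) := by
          rw [fibTraj, if_pos hlt]; exact List.mem_cons_self
        unfold outChar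
        rw [hTT]
        by_cases hi : i ∈ fibTraj cs.length b (b + b) (by omega)
        · rw [if_pos hi, if_pos (List.mem_cons.2 (Or.inr hi))]
        · rw [if_neg hi, if_neg (by
            intro hmem
            rcases List.mem_cons.1 hmem with rfl | h'
            · exact hi hhead
            · exact hi h')]
      · have hab' : a < b := by omega
        rw [segB, if_pos hlt, if_neg heq]
        have htraj : fibTraj cs.length a b hb
            = a :: fibTraj cs.length b (a + b) (by omega) := by
          rw [fibTraj, if_pos hlt]
        -- the slice s[a+1:b].lower()
        have hslice : (PySem.List.slice cs (some ((a : Int) + 1)) (some (b : Int))).map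
              PySem.Chars.lowerChar
            = (List.range' (a + 1) (min (b - (a + 1)) (cs.length - (a + 1)))).map
                (fun i => PySem.Chars.lowerChar (cs.getD i ' ')) := by
          have h1 : ((a : Int) + 1) = ((a + 1 : Nat) : Int) := by push_cast; ring
          rw [h1, PySem.List.slice_natCast, drop_take_map]
        -- split the tail range at min b cs.length
        have hsplit : List.range' (a + 1) (cs.length - (a + 1))
            = List.range' (a + 1) (min (b - (a + 1)) (cs.length - (a + 1)))
                ++ List.range' (min b cs.length) (cs.length - min b cs.length) := by
          have h2 := @List.range'_append (a + 1)
            (min (b - (a + 1)) (cs.length - (a + 1))) (cs.length - min b cs.length) 1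
          rw [show (a + 1) + 1 * min (b - (a + 1)) (cs.length - (a + 1))
                = min b cs.length by omega] at h2
          rw [h2]
          congr 1
          omega
        have hrange : List.range' a (cs.length - a)
            = a :: List.range' (a + 1) (cs.length - (a + 1)) := by
          rw [show cs.length - a = (cs.length - (a + 1)) + 1 by omega, List.range'_succ]
        rw [hrange, List.map_cons, hslice,
          ih cs b (a + b) (by omega) (by omega) (by omega), hsplit, List.map_append,
          List.cons_eq_cons]
        refine ⟨?_, ?_⟩
        · -- head: a is on the trajectory
          unfold outChar
          rw [if_pos (show a ∈ fibTraj cs.length a b hb by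
            rw [htraj]; exact List.mem_cons_self)]
        congr 1
        · -- middle: indices strictly between a and b are not on the trajectory
          apply List.map_congr_left
          intro i hi
          obtain ⟨jj, hjj, rfl⟩ := List.mem_range'.1 hi
          unfold outChar
          rw [if_neg]
          intro hmem
          rw [htraj] at hmem
          rcases List.mem_cons.1 hmem with heq' | h'
          · omega
          · exact absurd (fibTraj_mem_ge _ _ _ _ (by omega) _ h') (by omega)
        · -- tail: from b on, membership in the (a,b)- and (b,a+b)-trajectories coincide
          by_cases hbn : b < cs.length
          · rw [show min b cs.length = b by omega]
            apply List.map_congr_left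
            intro i hi
            obtain ⟨jj, hjj, rfl⟩ := List.mem_range'.1 hi
            unfold outChar
            rw [htraj]
            by_cases hmem : (b + 1 * jj) ∈ fibTraj cs.length b (a + b) (by omega)
            · rw [if_pos hmem, if_pos (List.mem_cons.2 (Or.inr hmem))]
            · rw [if_neg hmem, if_neg (by
                intro h'
                rcases List.mem_cons.1 h' with heq' | h''
                · omega
                · exact hmem h'')]
          · rw [show min b cs.length = cs.length by omega]
            simp [show cs.length - b = 0 by omega]
    · rw [segB, if_neg hlt, show cs.length - a = 0 by omega]
      rfl

theorem segB_eq (cs : List Char) :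
    segB cs (2 * cs.length + 1) 0 1
      = (List.range' 0 (cs.length - 0)).map (outChar cs cs.length 0 1 Nat.one_pos) :=
  segB_eq_aux (2 * cs.length + 1) cs 0 1 (Nat.zero_le 1) Nat.one_pos (by omega)

-- A's enumerate-fold, rewritten as the same per-index rule over the full index range
theorem aList_eq (cs : List Char) :
    (PySem.List.enumerate cs).map
        (fun ic => if PySem.Set.contains (fibSetA cs.length 0 1 Nat.one_pos PySem.Set.empty) ic.1
                   then (if PySem.Chars.isalpha ic.2 then PySem.Chars.upperChar ic.2 else ic.2)
                   else PySem.Chars.lowerChar ic.2) =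
      (List.range' 0 (cs.length - 0)).map (outChar cs cs.length 0 1 Nat.one_pos) := by
  apply List.ext_getElem?
  intro i
  rw [List.getElem?_map, PySem.List.getElem?_enumerate, List.getElem?_map]
  by_cases hi : i < cs.length
  · rw [List.getElem?_eq_getElem hi,
      List.getElem?_range' (show i < cs.length - 0 by omega)]
    simp only [Option.map_some, Option.some.injEq, zero_add, Nat.one_mul]
    rw [contains_fibSetA cs.length i]
    unfold outChar
    by_cases hmem : i ∈ fibTraj cs.length 0 1 Nat.one_pos <;> simp [hmem, List.getD, List.getElem?_eq_getElem hi]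
  · have hn : (List.range' 0 (cs.length - 0))[i]? = none :=
      List.getElem?_eq_none (by simp [List.length_range']; omega)
    rw [List.getElem?_eq_none (by omega), hn]
    rfl

-- ===== VERDICT (by name: the statement is the Claim_ definition above) =====
theorem capitalize_fibonacci_spec : Claim_equal_capitalize_fibonacci := by
  intro s _
  unfold Spec_capitalize_fibonacci capitalize_fibonacci capitalize_fibonacci_alt
  dsimp only
  rw [foldl_append_ite, List.nil_append, aList_eq, ← segB_eq]
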